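-- pv_equiv track=rewrite | github.com/byWhale/second-reader | reading-companion-backend/src/reading_mechanisms/iterator_v1.py | _normalize_with_offsets
-- ===== SOURCE A (Python) =====
-- import unicodedata
--
-- def _normalize_with_offsets(value: str, offsets: list[object] | None = None) -> tuple[str, list[object]]:
--     """Normalize text while preserving raw-position offsets for source-span recovery."""
--
--     raw_offsets = offsets if offsets is not None else [None] * len(value)
--     chars: list[tuple[str, object]] = []
--     for character, offset in zip(value, raw_offsets, strict=False):
--         normalized = unicodedata.normalize("NFKC", character)
--         normalized = normalized.replace("“", '"').replace("”", '"')
--         normalized = normalized.replace("’", "'").replace("–", "-").replace("—", "-")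
--         normalized = normalized.replace("…", "...")
--         normalized = normalized.lower()
--         for item in normalized:
--             chars.append((" " if item.isspace() else item, offset))
--
--     collapsed: list[tuple[str, object]] = []
--     for character, offset in chars:
--         if character == " " and (not collapsed or collapsed[-1][0] == " "):
--             continue
--         collapsed.append((character, offset))
--     while collapsed and collapsed[0][0] == " ":
--         collapsed.pop(0)
--     while collapsed and collapsed[-1][0] == " ":
--         collapsed.pop()
--
--     punctuation = set(",.;:!?()\"'")
--     filtered: list[tuple[str, object]] = []
--     for index, (character, offset) in enumerate(collapsed):
--         if character == " ":
--             previous_character = collapsed[index - 1][0] if index > 0 else ""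
--             next_character = collapsed[index + 1][0] if index + 1 < len(collapsed) else ""
--             if previous_character in punctuation or next_character in punctuation:
--                 continue
--         filtered.append((character, offset))
--     return "".join(character for character, _offset in filtered), [offset for _character, offset in filtered]
-- ===== SOURCE B (Python) =====
-- import unicodedata
--
-- _PUNCT = set(",.;:!?()\"'")
--
--
-- def _normalize_with_offsets(value: str, offsets: list[object] | None = None) -> tuple[str, list[object]]:
--     """Single streaming pass: normalize each char, collapse/strip/filter spaces on the fly."""
--     raw_offsets = offsets if offsets is not None else [None] * len(value)
--     out: list[tuple[str, object]] = []
--     pending: object = None  # offset of a pending (not yet emitted) space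
--     have_pending = False
--     for character, offset in zip(value, raw_offsets):
--         normalized = unicodedata.normalize("NFKC", character)
--         normalized = normalized.replace("“", '"').replace("”", '"')
--         normalized = normalized.replace("’", "'").replace("–", "-").replace("—", "-")
--         normalized = normalized.replace("…", "...")
--         normalized = normalized.lower()
--         for item in normalized:
--             if item.isspace():
--                 if out and not have_pending:
--                     have_pending = True
--                     pending = offset
--             else:
--                 if have_pending:
--                     if out[-1][0] not in _PUNCT and item not in _PUNCT:
--                         out.append((" ", pending))
--                     have_pending = False
--                 out.append((item, offset))
--     return "".join(c for c, _ in out), [o for _, o in out]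
-- ===== Notes on version B (the rewrite author's own statement) =====
-- stated objective: simpler
-- what changed: A's three list passes after normalization (collapse space runs, strip leading/trailing spaces, drop punctuation-adjacent spaces via indexed neighbour lookups) are fused into one streaming pass that holds only a pending-space flag with its offset, emitting a surviving space lazily when the next non-space character arrives; no intermediate lists are built.
import Mathlib
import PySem

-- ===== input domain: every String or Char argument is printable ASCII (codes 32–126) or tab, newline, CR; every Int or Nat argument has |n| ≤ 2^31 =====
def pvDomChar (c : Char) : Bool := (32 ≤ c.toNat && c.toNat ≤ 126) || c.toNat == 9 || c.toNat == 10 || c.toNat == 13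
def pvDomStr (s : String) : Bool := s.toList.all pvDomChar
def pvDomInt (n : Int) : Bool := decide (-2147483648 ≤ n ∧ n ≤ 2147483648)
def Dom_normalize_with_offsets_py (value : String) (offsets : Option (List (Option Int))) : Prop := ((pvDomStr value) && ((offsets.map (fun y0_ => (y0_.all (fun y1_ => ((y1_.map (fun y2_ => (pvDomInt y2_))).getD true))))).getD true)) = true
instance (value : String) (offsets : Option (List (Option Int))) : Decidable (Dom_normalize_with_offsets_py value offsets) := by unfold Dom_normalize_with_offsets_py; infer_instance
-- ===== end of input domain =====

-- B replaces A's three list passes (collapse spaces / strip ends / punctuation-adjacent space filter)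
-- by one streaming pass holding a pending-space flag; objective: simpler (one pass, no intermediate lists).

-- ===== PORT A =====

-- punctuation = set(",.;:!?()\"'")
def pvPunct : List Char := [',', '.', ';', ':', '!', '?', '(', ')', '"', '\'']

-- unicodedata.normalize("NFKC", character) followed by the curly-quote/dash/ellipsis replaces is the
-- identity on the printable-ASCII (plus tab/newline/CR) input domain, so only .lower() remains; exact there.
def pvNormCharA (c : Char) : List Char := PySem.Chars.lower [c]

-- one step of A's `collapsed` loop
def pvCollapseStep (acc : List (Char × Option Int)) (x : Char × Option Int) :
    List (Char × Option Int) :=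
  if x.1 = ' ' ∧ (acc = [] ∨ acc.getLast?.map Prod.fst = some ' ') then acc else acc ++ [x]

-- while collapsed and collapsed[0] == " ": collapsed.pop(0)
def pvStripLead (l : List (Char × Option Int)) : List (Char × Option Int) :=
  l.dropWhile (fun x => x.1 == ' ')

-- while collapsed and collapsed[-1] == " ": collapsed.pop()
def pvStripTrail (l : List (Char × Option Int)) : List (Char × Option Int) :=
  (l.reverse.dropWhile (fun x => x.1 == ' ')).reverse

-- `previous_character in punctuation` with previous_character = "" modelled as Option Char = none
def pvPunctO (o : Option Char) : Bool := o.elim false pvPunct.contains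

-- one step of A's `filtered` loop (ix from enumerate(collapsed); l is collapsed itself)
def pvFiltStepA (l : List (Char × Option Int)) (acc : List (Char × Option Int))
    (ix : Int × (Char × Option Int)) : List (Char × Option Int) :=
  if ix.2.1 = ' ' then
    let prev : Option Char := if ix.1 > 0 then (PySem.List.pyGet? l (ix.1 - 1)).map Prod.fst else none
    let next : Option Char := if ix.1 + 1 < (l.length : Int) then (PySem.List.pyGet? l (ix.1 + 1)).map Prod.fst else none
    if pvPunctO prev || pvPunctO next then acc else acc ++ [ix.2]
  else acc ++ [ix.2]

def normalize_with_offsets_py (value : String) (offsets : Option (List (Option Int))) :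
    String × List (Option Int) :=
  let raw_offsets := offsets.getD (List.replicate value.toList.length none)
  let chars := (value.toList.zip raw_offsets).foldl
    (fun acc p => acc ++ (pvNormCharA p.1).map
      (fun item => ((if PySem.Chars.isspace item then ' ' else item), p.2))) []
  let collapsed := chars.foldl pvCollapseStep []
  let collapsed := pvStripTrail (pvStripLead collapsed)
  let filtered := (PySem.List.enumerate collapsed).foldl (pvFiltStepA collapsed) []
  (String.ofList (filtered.map Prod.fst), filtered.map Prod.snd)

-- ===== PORT B =====

-- Source B's per-character normalization (same chain as A's source; identity but .lower() on the ASCII domain)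
def pvNormCharB (c : Char) : List Char := PySem.Chars.lower [c]

-- one step of Source B's streaming loop; state = (out, pending-space offset if have_pending)
def pvEmit (st : List (Char × Option Int) × Option (Option Int)) (item : Char)
    (off : Option Int) : List (Char × Option Int) × Option (Option Int) :=
  if PySem.Chars.isspace item then
    if st.1 ≠ [] ∧ st.2 = none then (st.1, some off) else st
  else
    match st.2 with
    | none => (st.1 ++ [(item, off)], none)
    | some poff =>
      if pvPunctO (st.1.getLast?.map Prod.fst) = false ∧ pvPunct.contains item = false then
        (st.1 ++ [(' ', poff), (item, off)], none)
      else
        (st.1 ++ [(item, off)], none)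

def normalize_with_offsets_py_alt (value : String) (offsets : Option (List (Option Int))) :
    String × List (Option Int) :=
  let raw_offsets := offsets.getD (List.replicate value.toList.length none)
  let st := (value.toList.zip raw_offsets).foldl
    (fun st p => (pvNormCharB p.1).foldl (fun st item => pvEmit st item p.2) st)
    ([], none)
  (String.ofList (st.1.map Prod.fst), st.1.map Prod.snd)

-- ===== PRECONDITION & SPEC =====
def Spec_normalize_with_offsets_py (value : String) (offsets : Option (List (Option Int))) (out : String × List (Option Int)) : Prop := out = normalize_with_offsets_py_alt value offsets
instance (value : String) (offsets : Option (List (Option Int))) (out : String × List (Option Int)) : Decidable (Spec_normalize_with_offsets_py value offsets out) := by unfold Spec_normalize_with_offsets_py; infer_instance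

-- ===== CLAIM (what is proved, stated in full; the proofs are below) =====
def Claim_equal_normalize_with_offsets_py : Prop := ∀ (value : String) (offsets : Option (List (Option Int))), Dom_normalize_with_offsets_py value offsets → Spec_normalize_with_offsets_py value offsets (normalize_with_offsets_py value offsets)

-- ===== LEMMAS AND PROOFS =====

-- neighbour-local reformulation of A's index-based filter loop (prev = the previous element, if any)
def pvFiltAux (prev : Option Char) : List (Char × Option Int) → List (Char × Option Int)
  | [] => []
  | x :: rest =>
    (if x.1 = ' ' ∧ (pvPunctO prev || pvPunctO (rest.head?.map Prod.fst)) = true then [] else [x])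
      ++ pvFiltAux (some x.1) rest

-- the invariant tying B's streaming state to A's collapsed prefix C
def pvInv (C : List (Char × Option Int)) (st : List (Char × Option Int) × Option (Option Int)) : Prop :=
  C.head?.map Prod.fst ≠ some ' ' ∧
  match st.2 with
  | none => C.getLast?.map Prod.fst ≠ some ' ' ∧ st.1 = pvFiltAux none C
  | some off => ∃ core z, C = core ++ [(' ', off)] ∧ core.getLast?.map Prod.fst = some z ∧ z ≠ ' ' ∧
      st.1 = pvFiltAux none core

theorem pvFiltAux_cons (p : Option Char) (y : Char × Option Int) (rest : List (Char × Option Int)) :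
    pvFiltAux p (y :: rest)
      = (if y.1 = ' ' ∧ (pvPunctO p || pvPunctO (rest.head?.map Prod.fst)) = true then [] else [y])
        ++ pvFiltAux (some y.1) rest := rfl

theorem pvFilt_append_nonspace (l : List (Char × Option Int)) (x : Char × Option Int)
    (hl : l.getLast?.map Prod.fst ≠ some ' ') (hx : x.1 ≠ ' ') :
    ∀ (prev : Option Char), pvFiltAux prev (l ++ [x]) = pvFiltAux prev l ++ [x] := by
  induction l with
  | nil => intro prev; simp [pvFiltAux, hx]
  | cons y t ih =>
    intro prev
    cases t with
    | nil =>
      have hy : y.1 ≠ ' ' := by simpa using hl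
      simp [pvFiltAux, hx, hy]
    | cons z t' =>
      have hl' : (z :: t').getLast?.map Prod.fst ≠ some ' ' := by
        simpa [List.getLast?_cons_cons] using hl
      rw [List.cons_append, pvFiltAux_cons, pvFiltAux_cons, ih hl']
      simp [List.cons_append, List.append_assoc]

theorem pvFilt_append_space_nonspace (l : List (Char × Option Int)) (z : Char)
    (hz : l.getLast?.map Prod.fst = some z) (hzs : z ≠ ' ')
    (o : Option Int) (x : Char × Option Int) (hx : x.1 ≠ ' ') :
    ∀ (prev : Option Char), pvFiltAux prev (l ++ [(' ', o), x])
      = pvFiltAux prev l ++ ((if pvPunct.contains z || pvPunct.contains x.1 then [] else [(' ', o)]) ++ [x]) := by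
  induction l with
  | nil => intro prev; simp at hz
  | cons y t ih =>
    intro prev
    cases t with
    | nil =>
      have hy : y.1 = z := by simpa using hz
      subst hy
      simp [pvFiltAux, hx, hzs, pvPunctO]
    | cons w t' =>
      have hz' : (w :: t').getLast?.map Prod.fst = some z := by
        simpa [List.getLast?_cons_cons] using hz
      rw [List.cons_append, pvFiltAux_cons, pvFiltAux_cons, ih hz']
      simp [List.cons_append, List.append_assoc]

theorem pvFilt_getLast (l : List (Char × Option Int)) (z : Char)
    (hz : l.getLast?.map Prod.fst = some z) (hzs : z ≠ ' ') :
    ∀ (prev : Option Char), (pvFiltAux prev l).getLast?.map Prod.fst = some z := by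
  induction l with
  | nil => intro prev; simp at hz
  | cons y t ih =>
    intro prev
    cases t with
    | nil =>
      have hy : y.1 = z := by simpa using hz
      simp [pvFiltAux, hy, hzs]
    | cons w t' =>
      have hz' : (w :: t').getLast?.map Prod.fst = some z := by
        simpa [List.getLast?_cons_cons] using hz
      rw [pvFiltAux_cons]
      have h2 := ih hz' (some y.1)
      have hne : pvFiltAux (some y.1) (w :: t') ≠ [] := by
        intro h; rw [h] at h2; simp at h2
      rw [List.getLast?_append_of_ne_nil _ hne]
      exact h2

theorem pvFiltA_gen (suf : List (Char × Option Int)) :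
    ∀ (pre acc : List (Char × Option Int)),
      (PySem.List.enumerate suf (pre.length : Int)).foldl (pvFiltStepA (pre ++ suf)) acc
        = acc ++ pvFiltAux (pre.getLast?.map Prod.fst) suf := by
  induction suf with
  | nil => intro pre acc; simp [PySem.List.enumerate_nil, pvFiltAux]
  | cons x suf' ih =>
    intro pre acc
    rw [PySem.List.enumerate_cons, List.foldl_cons]
    -- the one step
    have hprev : (if ((pre.length : Int)) > 0 then
        (PySem.List.pyGet? (pre ++ x :: suf') ((pre.length : Int) - 1)).map Prod.fst else none)
        = pre.getLast?.map Prod.fst := by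
      cases pre with
      | nil => simp
      | cons p ps =>
        have hpos : ((((p :: ps).length : Nat)) : Int) > 0 := by simp
        rw [if_pos hpos]
        have hcast : (((p :: ps).length : Nat) : Int) - 1 = (((ps.length : Nat)) : Int) := by
          simp
        rw [hcast, PySem.List.pyGet?_natCast]
        rw [List.getElem?_append_left (by simp)]
        rw [List.getLast?_eq_getElem?]
        simp
    have hnext : (if ((pre.length : Int)) + 1 < (((pre ++ x :: suf').length : Nat) : Int) then
        (PySem.List.pyGet? (pre ++ x :: suf') ((pre.length : Int) + 1)).map Prod.fst else none)
        = suf'.head?.map Prod.fst := by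
      cases suf' with
      | nil => rw [if_neg (by simp)]; simp
      | cons y ys =>
        rw [if_pos (by simp)]
        have hcast : ((pre.length : Nat) : Int) + 1 = (((pre.length + 1 : Nat)) : Int) := by omega
        rw [hcast, PySem.List.pyGet?_natCast]
        rw [List.getElem?_append_right (by omega)]
        simp
    have hstep : pvFiltStepA (pre ++ x :: suf') acc ((pre.length : Int), x)
        = acc ++ (if x.1 = ' ' ∧ (pvPunctO (pre.getLast?.map Prod.fst) || pvPunctO (suf'.head?.map Prod.fst)) = true then [] else [x]) := by
      by_cases hx : x.1 = ' '
      · simp only [pvFiltStepA, hx, if_true]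
        rw [hprev, hnext]
        by_cases hp : (pvPunctO (pre.getLast?.map Prod.fst) || pvPunctO (suf'.head?.map Prod.fst)) = true
        · simp [hp]
        · simp [hp]
      · simp [pvFiltStepA, hx]
    rw [hstep]
    have hassoc : pre ++ x :: suf' = (pre ++ [x]) ++ suf' := by simp
    have hlen : (pre.length : Int) + 1 = (((pre ++ [x]).length : Nat) : Int) := by simp
    rw [hassoc, hlen, ih (pre ++ [x])]
    simp [pvFiltAux, List.append_assoc]

theorem pvInv_step (C : List (Char × Option Int)) (st) (item : Char) (off : Option Int)
    (h : pvInv C st) :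
    pvInv (pvCollapseStep C ((if PySem.Chars.isspace item then ' ' else item), off))
          (pvEmit st item off) := by
  obtain ⟨out, pend⟩ := st
  obtain ⟨hhead, hrest⟩ := h
  by_cases hsp : PySem.Chars.isspace item = true
  · -- item is whitespace: collapsed gets (' ', off) or nothing; B only toggles pending
    simp only [pvEmit, hsp, if_true]
    cases pend with
    | none =>
      dsimp only at hrest
      obtain ⟨hlast, hout⟩ := hrest
      cases C with
      | nil =>
        have hout0 : out = [] := by simpa [pvFiltAux] using hout
        subst hout0
        simp only [ne_eq, not_true_eq_false, false_and, if_false]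
        have : pvCollapseStep [] (' ', off) = [] := by simp [pvCollapseStep]
        rw [this]
        exact ⟨by simp, by simp [pvFiltAux]⟩
      | cons c C' =>
        have hc : c.1 ≠ ' ' := by simpa using hhead
        have houtne : out ≠ [] := by
          rw [hout]; simp [pvFiltAux, hc]
        rw [if_pos ⟨houtne, rfl⟩]
        have hColl : pvCollapseStep (c :: C') (' ', off) = (c :: C') ++ [(' ', off)] := by
          simp [pvCollapseStep, hlast]
        rw [hColl]
        obtain ⟨lp, hlp⟩ : ∃ lp, (c :: C').getLast? = some lp := by
          cases hl : (c :: C').getLast? with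
          | none => simp at hl
          | some lp => exact ⟨lp, rfl⟩
        refine ⟨by simpa using hhead, ⟨c :: C', lp.1, rfl, by simp [hlp], ?_, hout⟩⟩
        intro hzsp; apply hlast; simp [hlp, hzsp]
    | some off0 =>
      dsimp only at hrest
      obtain ⟨core, z, hC, hcl, hz, hout⟩ := hrest
      rw [if_neg (by simp)]
      have hClast : C.getLast?.map Prod.fst = some ' ' := by
        rw [hC]; simp
      have hColl : pvCollapseStep C (' ', off) = C := by
        simp [pvCollapseStep, hClast]
      rw [hColl]
      exact ⟨hhead, core, z, hC, hcl, hz, hout⟩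
  · -- item is not whitespace (hence not ' '): collapsed appends; B flushes any pending space
    have hit : item ≠ ' ' := by
      intro he; subst he; exact hsp (by decide)
    have hColl : pvCollapseStep C (item, off) = C ++ [(item, off)] := by
      simp [pvCollapseStep, hit]
    simp only [pvEmit, hsp, Bool.false_eq_true, if_false, hColl]
    cases pend with
    | none =>
      dsimp only at hrest ⊢
      obtain ⟨hlast, hout⟩ := hrest
      constructor
      · cases C with
        | nil => simp [hit]
        | cons c C' => simpa using hhead
      · refine ⟨by simp [hit], ?_⟩
        dsimp only
        rw [hout, pvFilt_append_nonspace C (item, off) hlast hit none]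
    | some poff =>
      dsimp only at hrest ⊢
      obtain ⟨core, z, hC, hcl, hz, hout⟩ := hrest
      have hcore_ne : core ≠ [] := by
        intro he; rw [he] at hcl; simp at hcl
      have houtlast : out.getLast?.map Prod.fst = some z := by
        rw [hout]; exact pvFilt_getLast core z hcl hz none
      have hC' : C ++ [(item, off)] = core ++ [(' ', poff), (item, off)] := by
        rw [hC]; simp
      rw [houtlast]
      have hhead' : (C ++ [(item, off)]).head?.map Prod.fst ≠ some ' ' := by
        rw [hC]
        cases core with
        | nil => exact absurd rfl hcore_ne
        | cons c cc => simpa [hC] using hhead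
      have hlast' : (C ++ [(item, off)]).getLast?.map Prod.fst ≠ some ' ' := by
        simp [hit]
      have hzz : pvPunctO (some z) = pvPunct.contains z := rfl
      by_cases hcase : pvPunctO (some z) = false ∧ pvPunct.contains item = false
      · rw [if_pos hcase]
        refine ⟨hhead', hlast', ?_⟩
        dsimp only
        rw [hC', pvFilt_append_space_nonspace core z hcl hz poff (item, off) hit none, hout]
        rw [hzz] at hcase
        have h1 : z ∉ pvPunct := by simpa using hcase.1
        have h2 : item ∉ pvPunct := by simpa using hcase.2
        simp [h1, h2]
      · rw [if_neg hcase]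
        refine ⟨hhead', hlast', ?_⟩
        dsimp only
        rw [hC', pvFilt_append_space_nonspace core z hcl hz poff (item, off) hit none, hout]
        rw [hzz] at hcase
        have hmem : z ∈ pvPunct ∨ item ∈ pvPunct := by
          by_contra hno
          push Not at hno
          exact hcase ⟨by simpa using hno.1, by simpa using hno.2⟩
        simp [hmem]

-- the invariant holds after streaming any item list against A's collapse of its spacified image
theorem pvInv_fold (items : List (Char × Option Int)) :
    ∀ C st, pvInv C st →
      pvInv ((items.map (fun q => ((if PySem.Chars.isspace q.1 then ' ' else q.1), q.2))).foldl pvCollapseStep C)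
            (items.foldl (fun st q => pvEmit st q.1 q.2) st) := by
  induction items with
  | nil => intro C st h; exact h
  | cons q rest ih =>
    intro C st h
    exact ih _ _ (pvInv_step C st q.1 q.2 h)

theorem pvStripLead_id (l : List (Char × Option Int)) (h : l.head?.map Prod.fst ≠ some ' ') :
    pvStripLead l = l := by
  cases l with
  | nil => rfl
  | cons c t =>
    have hc : c.1 ≠ ' ' := by simpa using h
    simp [pvStripLead, hc]

theorem pvStripTrail_id (l : List (Char × Option Int)) (h : l.getLast?.map Prod.fst ≠ some ' ') :
    pvStripTrail l = l := by
  cases hr : l.reverse with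
  | nil =>
    have h0 : l = [] := List.reverse_eq_nil_iff.mp hr
    subst h0; rfl
  | cons c t =>
    have hc : c.1 ≠ ' ' := by
      have : l.getLast? = some c := by
        rw [← List.head?_reverse, hr]; rfl
      intro he; exact h (by simp [this, he])
    have : pvStripTrail l = (c :: t).reverse := by
      simp [pvStripTrail, hr, hc]
    rw [this, ← hr, List.reverse_reverse]

theorem pvStripTrail_snoc (core : List (Char × Option Int)) (z : Char) (off : Option Int)
    (hcl : core.getLast?.map Prod.fst = some z) (hz : z ≠ ' ') :
    pvStripTrail (core ++ [(' ', off)]) = core := by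
  obtain ⟨lp, hlp⟩ : ∃ lp, core.getLast? = some lp := by
    cases hl : core.getLast? with
    | none => rw [hl] at hcl; simp at hcl
    | some lp => exact ⟨lp, rfl⟩
  have hlpz : lp.1 = z := by rw [hlp] at hcl; simpa using hcl
  cases hr : core.reverse with
  | nil =>
    have : core = [] := List.reverse_eq_nil_iff.mp hr
    rw [this] at hlp; simp at hlp
  | cons c t =>
    have hcz : c = lp := by
      have : core.getLast? = some c := by rw [← List.head?_reverse, hr]; rfl
      rw [this] at hlp; exact (Option.some.injEq _ _).mp hlp
    have hc1 : c.1 ≠ ' ' := by rw [hcz, hlpz]; exact hz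
    have : pvStripTrail (core ++ [(' ', off)]) = (c :: t).reverse := by
      simp [pvStripTrail, hr, hc1]
    rw [this, ← hr, List.reverse_reverse]

theorem pvFiltA_whole (l : List (Char × Option Int)) :
    (PySem.List.enumerate l).foldl (pvFiltStepA l) [] = pvFiltAux none l := by
  have := pvFiltA_gen l [] []
  simpa using this

-- ===== VERDICT (by name: the statement is the Claim_ definition above) =====
theorem normalize_with_offsets_py_spec : Claim_equal_normalize_with_offsets_py := by
  intro value offsets _hdom
  unfold Spec_normalize_with_offsets_py normalize_with_offsets_py normalize_with_offsets_py_alt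
  dsimp only
  set raw := offsets.getD (List.replicate value.toList.length none) with hraw
  set zl := value.toList.zip raw with hzl
  -- the raw normalized item stream, shared by both ports
  set items := zl.flatMap (fun p => (pvNormCharB p.1).map (fun item => (item, p.2))) with hitems
  -- A's `chars` is the spacified image of the item stream
  have hchars : zl.foldl
      (fun acc p => acc ++ (pvNormCharA p.1).map
        (fun item => ((if PySem.Chars.isspace item then ' ' else item), p.2))) []
      = items.map (fun q => ((if PySem.Chars.isspace q.1 then ' ' else q.1), q.2)) := by
    rw [PySem.List.foldl_append_eq_flatMap]
    rw [hitems, List.map_flatMap]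
    simp [List.map_map, Function.comp_def, pvNormCharA, pvNormCharB]
  -- B's fold over the input is the fold of pvEmit over the item stream
  have hbfold : zl.foldl
      (fun st p => (pvNormCharB p.1).foldl (fun st item => pvEmit st item p.2) st) (([], none) : List (Char × Option Int) × Option (Option Int))
      = items.foldl (fun st q => pvEmit st q.1 q.2) ([], none) := by
    rw [hitems, List.foldl_flatMap]
    have hstep : (fun (st : List (Char × Option Int) × Option (Option Int)) (p : Char × Option Int) =>
          (pvNormCharB p.1).foldl (fun st item => pvEmit st item p.2) st)
        = fun st p => ((pvNormCharB p.1).map (fun item => (item, p.2))).foldl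
            (fun st q => pvEmit st q.1 q.2) st := by
      funext st p
      rw [List.foldl_map]
    rw [hstep]
  rw [hchars, hbfold]
  have hinv := pvInv_fold items [] ([], none) ⟨by simp, by simp, rfl⟩
  set C := (items.map (fun q => ((if PySem.Chars.isspace q.1 then ' ' else q.1), q.2))).foldl pvCollapseStep [] with hC
  set st := items.foldl (fun st q => pvEmit st q.1 q.2) ([], none) with hst
  obtain ⟨hhead, hrest⟩ := hinv
  rw [pvStripLead_id C hhead]
  obtain ⟨out, pend⟩ := st
  cases pend with
  | none =>
    dsimp only at hrest
    obtain ⟨hlast, hout⟩ := hrest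
    rw [pvStripTrail_id C hlast, pvFiltA_whole C, ← hout]
  | some off =>
    dsimp only at hrest
    obtain ⟨core, z, hCeq, hcl, hz, hout⟩ := hrest
    rw [hCeq, pvStripTrail_snoc core z off hcl hz, pvFiltA_whole core, ← hout]
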